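-- pv_equiv track=rewrite | github.com/Sonypriyasonu/Python-Practice | PermutationIMP.py | gooo
-- ===== SOURCE A (Python) =====
-- def gooo(s,t):
--     s1=set()
--     for i in s:
--         s1.add(i)
--     l1=[]
--     l2=[]
--     for i in s1:
--         k=[]
--         for j in range(0,len(s)):
--             if(i==s[j]):
--                 k.append(j)
--         l1.append(k)
--     s2=set()
--     for i in t:
--         s2.add(i)
--     for i in s2:
--         k=[]
--         for j in range(0,len(t)):
--             if(i==t[j]):
--                 k.append(j)
--         l2.append(k)
--     l1.sort()
--     l2.sort()
--     return l1==l2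
-- ===== SOURCE B (Python) =====
-- def gooo(s, t):
--     def pattern(x):
--         d = {}
--         for i, c in enumerate(x):
--             d.setdefault(c, []).append(i)
--         return sorted(d.values())
--     return pattern(s) == pattern(t)
-- ===== Notes on version B (the rewrite author's own statement) =====
-- stated objective: faster
-- what changed: Replaces A's per-distinct-character rescans of the whole string (set loop with a nested full-length index scan for each character) by a single enumerate pass building a dict char->position-list, then sorts the value lists and compares.
import Mathlib
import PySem

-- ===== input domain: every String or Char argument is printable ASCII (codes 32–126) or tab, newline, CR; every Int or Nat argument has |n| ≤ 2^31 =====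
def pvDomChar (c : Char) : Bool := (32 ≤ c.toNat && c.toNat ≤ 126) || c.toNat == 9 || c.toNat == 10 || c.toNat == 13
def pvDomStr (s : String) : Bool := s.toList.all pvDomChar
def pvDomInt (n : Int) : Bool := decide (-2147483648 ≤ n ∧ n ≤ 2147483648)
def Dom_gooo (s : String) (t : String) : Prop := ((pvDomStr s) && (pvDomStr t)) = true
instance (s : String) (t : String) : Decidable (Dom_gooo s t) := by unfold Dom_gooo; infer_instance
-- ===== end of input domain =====

-- B replaces A's per-distinct-character full-string rescans by one enumerate pass
-- building a dict char -> position list, then sorting the value lists; exact same result.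

-- ===== PORT A =====
-- per-character inner loop of A:  k=[]; for j in range(0,len(x)): if i==x[j]: k.append(j)
-- (x[j] ported as pyGetD with a dummy default: j ranges over range(0,len(x)), always in bounds)
def goooScan (xl : List Char) (c : Char) : List Int :=
  (PySem.List.pyRange 0 (xl.length : Int)).foldl
    (fun k j => if c == PySem.List.pyGetD xl j ' ' then k ++ [j] else k) []

def gooo (s : String) (t : String) : Bool :=
  let sl := s.toList
  let tl := t.toList
  let s1 : PySem.Set Char := PySem.Set.ofList sl
  let l1 : List (List Int) := s1.foldl (fun acc c => acc ++ [goooScan sl c]) []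
  let s2 : PySem.Set Char := PySem.Set.ofList tl
  let l2 : List (List Int) := s2.foldl (fun acc c => acc ++ [goooScan tl c]) []
  PySem.List.sorted l1 (fun v => v) == PySem.List.sorted l2 (fun v => v)

-- ===== PORT B =====
-- one pass: d.setdefault(c, []).append(i)  ==  Dict.modify c [] (· ++ [i])
def goooAltPattern (xl : List Char) : List (List Int) :=
  let d : PySem.Dict Char (List Int) :=
    (PySem.List.enumerate xl).foldl
      (fun d p => d.modify p.2 [] (fun l => l ++ [p.1])) ⟨[]⟩
  PySem.List.sorted d.values (fun v => v)

def gooo_alt (s : String) (t : String) : Bool :=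
  goooAltPattern s.toList == goooAltPattern t.toList

-- ===== PRECONDITION & SPEC =====
def Spec_gooo (s : String) (t : String) (out : Bool) : Prop := out = gooo_alt s t
instance (s : String) (t : String) (out : Bool) : Decidable (Spec_gooo s t out) := by unfold Spec_gooo; infer_instance

-- ===== CLAIM (what is proved, stated in full; the proofs are below) =====
def Claim_equal_gooo : Prop := ∀ (s : String) (t : String), Dom_gooo s t → Spec_gooo s t (gooo s t)

-- ===== LEMMAS AND PROOFS =====

-- positions (as Nat) of c in xl
def posNat (xl : List Char) (c : Char) : List Nat :=
  match xl with
  | [] => []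
  | x :: xs => (if x == c then [0] else []) ++ (posNat xs c).map (· + 1)

-- positions of c in xl, as Int (what both programs collect)
def gPos (xl : List Char) (c : Char) : List Int := (posNat xl c).map (Nat.cast)

lemma posNat_append_singleton (p : List Char) (a c : Char) :
    posNat (p ++ [a]) c = posNat p c ++ (if a == c then [p.length] else []) := by
  induction p with
  | nil => simp [posNat]
  | cons x xs ih =>
      simp only [List.cons_append, posNat, ih, List.map_append, List.append_assoc]
      by_cases hac : a = c <;> simp [hac]

lemma gPos_append_singleton (p : List Char) (a c : Char) :
    gPos (p ++ [a]) c = gPos p c ++ (if a == c then [(p.length : Int)] else []) := by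
  simp only [gPos, posNat_append_singleton]
  split <;> simp

lemma filter_range_eq_posNat (xl : List Char) (c : Char) :
    (List.range xl.length).filter (fun j => c == xl.getD j ' ') = posNat xl c := by
  induction xl with
  | nil => simp [posNat]
  | cons x xs ih =>
      rw [List.length_cons, List.range_succ_eq_map]
      simp only [List.filter_cons, List.getD_cons_zero, List.filter_map, posNat]
      have hcomp : ((fun j => c == List.getD (x :: xs) j ' ') ∘ Nat.succ)
          = fun j => c == xs.getD j ' ' := by
        funext j; simp
      rw [hcomp, ih]
      rcases h : (x == c) with _ | _
      · have : (c == x) = false := by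
          cases hcx : (c == x) <;> simp_all [BEq.comm]
        simp [this]
      · have : (c == x) = true := by simp_all [BEq.comm]
        simp [this]

lemma goooScan_eq_gPos (xl : List Char) (c : Char) :
    goooScan xl c = gPos xl c := by
  unfold goooScan
  rw [PySem.List.pyRange_zero_natCast, List.foldl_map]
  have hcong : List.foldl
      (fun (k : List Int) (j : Nat) => if c == PySem.List.pyGetD xl (j : Int) ' ' then k ++ [(j : Int)] else k)
      [] (List.range xl.length)
      = List.foldl
      (fun (k : List Int) (j : Nat) => if (fun j => c == xl.getD j ' ') j then k ++ [(j : Int)] else k)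
      [] (List.range xl.length) := by
    apply PySem.List.foldl_congr_mem
    intro acc j _
    rw [PySem.List.pyGetD_natCast]
  rw [hcong, PySem.List.foldl_append_if, filter_range_eq_posNat]
  rfl

lemma find?_map_self (S : List Char) (g : Char → List Int) (x : Char) (hx : x ∈ S) :
    List.find? (fun pr => pr.1 == x) (S.map (fun c => (c, g c))) = some (x, g x) := by
  induction S with
  | nil => cases hx
  | cons a as ih =>
      simp only [List.map_cons, List.find?_cons]
      by_cases hax : a = x
      · subst hax; simp
      · have : (a == x) = false := by simp [hax]
        simp only [this]
        rcases List.mem_cons.mp hx with h | h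
        · exact absurd h.symm hax
        · simpa [this] using ih h

lemma posNat_eq_nil_of_not_mem (p : List Char) (x : Char) (hx : x ∉ p) : posNat p x = [] := by
  induction p with
  | nil => rfl
  | cons a as ih =>
      have h1 : ¬ a = x := fun hax => hx (hax ▸ List.mem_cons_self)
      simp [posNat, h1, ih (fun hm => hx (List.mem_cons_of_mem _ hm))]

lemma modify_items_step (p : List Char) (x : Char) (d : PySem.Dict Char (List Int))
    (h : d.items = (PySem.Set.ofList p).map (fun c => (c, gPos p c))) :
    (d.modify x [] (fun l => l ++ [(p.length : Int)])).items
      = (PySem.Set.ofList (p ++ [x])).map (fun c => (c, gPos (p ++ [x]) c)) := by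
  have hS : PySem.Set.ofList (p ++ [x]) = PySem.Set.add (PySem.Set.ofList p) x := by
    simp [PySem.Set.ofList, List.foldl_append]
  by_cases hx : x ∈ PySem.Set.ofList p
  · have hc : d.contains x = true := by
      simp only [PySem.Dict.contains, h, List.any_map, List.any_eq_true]
      exact ⟨x, hx, by simp⟩
    have hget : d.getD x [] = gPos p x := by
      simp [PySem.Dict.getD, PySem.Dict.get?, h, find?_map_self _ _ _ hx]
    have hadd : PySem.Set.add (PySem.Set.ofList p) x = PySem.Set.ofList p := by
      simp [PySem.Set.add, hx]
    rw [PySem.Dict.modify, PySem.Dict.insert, if_pos hc, hget, hS, hadd, h, List.map_map]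
    apply List.map_congr_left
    intro c _
    by_cases hcx : c = x
    · subst hcx
      simp [gPos_append_singleton]
    · have h2 : ¬ x = c := fun hxc => hcx hxc.symm
      simp [gPos_append_singleton, hcx, h2]
  · have hc : d.contains x = false := by
      simp only [PySem.Dict.contains, h, List.any_map, List.any_eq_false]
      intro c hcS
      simp only [Function.comp_apply]
      intro hcx
      cases eq_of_beq hcx
      exact hx hcS
    have hadd : PySem.Set.add (PySem.Set.ofList p) x = PySem.Set.ofList p ++ [x] := by
      simp [PySem.Set.add, hx]
    have hxp : x ∉ p := fun hm => hx ((PySem.Set.mem_ofList p x).mpr hm)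
    rw [PySem.Dict.modify, PySem.Dict.insert, if_neg (by simp [hc]), hS, hadd, h, List.map_append]
    have hgx : gPos (p ++ [x]) x = [(p.length : Int)] := by
      rw [gPos_append_singleton, gPos, posNat_eq_nil_of_not_mem p x hxp]
      simp
    have hget : d.getD x [] = [] := by
      simp only [PySem.Dict.getD, PySem.Dict.get?, h]
      rw [List.find?_eq_none.mpr]
      · rfl
      · intro pr hpr
        obtain ⟨c, hcS, rfl⟩ := List.mem_map.mp hpr
        simp only [beq_iff_eq]
        exact fun hcx => hx (hcx ▸ hcS)
    rw [hget]
    have hmap : List.map (fun c => (c, gPos (p ++ [x]) c)) (PySem.Set.ofList p)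
        = List.map (fun c => (c, gPos p c)) (PySem.Set.ofList p) := by
      apply List.map_congr_left
      intro c hcS
      have h2 : ¬ x = c := fun hxc => hx (hxc ▸ hcS)
      simp [gPos_append_singleton, h2]
    simp [hmap, hgx]

-- the dict built by B's fold: items = (distinct chars so far, with their position lists)
lemma dict_fold_inv (q : List Char) : ∀ (p : List Char) (d : PySem.Dict Char (List Int)),
    d.items = (PySem.Set.ofList p).map (fun c => (c, gPos p c)) →
    ((PySem.List.enumerate q (p.length : Int)).foldl
        (fun d pr => d.modify pr.2 [] (fun l => l ++ [pr.1])) d).items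
      = (PySem.Set.ofList (p ++ q)).map (fun c => (c, gPos (p ++ q) c)) := by
  induction q with
  | nil => intro p d h; simpa [PySem.List.enumerate] using h
  | cons x xs ih =>
      intro p d h
      have hstep := modify_items_step p x d h
      have hlen : ((p ++ [x]).length : Int) = (p.length : Int) + 1 := by simp
      have := ih (p ++ [x]) (d.modify x [] (fun l => l ++ [(p.length : Int)])) hstep
      rw [hlen] at this
      simpa [PySem.List.enumerate, List.append_assoc] using this

lemma goooAltPattern_eq (xl : List Char) :
    goooAltPattern xl
      = PySem.List.sorted ((PySem.Set.ofList xl).map (fun c => gPos xl c)) (fun v => v) := by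
  unfold goooAltPattern
  have h := dict_fold_inv xl [] ⟨[]⟩ (by simp [PySem.Set.ofList, PySem.Set.empty])
  simp only [List.length_nil, Nat.cast_zero, List.nil_append] at h
  simp [PySem.Dict.values, h, List.map_map, Function.comp_def]

lemma gooo_side (xl : List Char) :
    PySem.List.sorted ((PySem.Set.ofList xl).foldl (fun acc c => acc ++ [goooScan xl c]) []) (fun v => v)
      = goooAltPattern xl := by
  rw [PySem.List.foldl_append_singleton_eq_map, goooAltPattern_eq]
  simp only [List.nil_append]
  congr 1
  exact List.map_congr_left (fun c _ => goooScan_eq_gPos xl c)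

-- ===== VERDICT (by name: the statement is the Claim_ definition above) =====
theorem gooo_spec : Claim_equal_gooo := by
  intro s t _
  unfold Spec_gooo gooo gooo_alt
  show (PySem.List.sorted ((PySem.Set.ofList s.toList).foldl
          (fun acc c => acc ++ [goooScan s.toList c]) []) (fun v => v)
        == PySem.List.sorted ((PySem.Set.ofList t.toList).foldl
          (fun acc c => acc ++ [goooScan t.toList c]) []) (fun v => v))
      = (goooAltPattern s.toList == goooAltPattern t.toList)
  rw [gooo_side s.toList, gooo_side t.toList]
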